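-- pv_equiv track=rewrite | github.com/leodavid0109/Fundamentos_Programaci-n_Python | Módulo 12; Aplicaciones (parte 3)/Matrices triangulares y diagonales.py | triangular_inferior
-- ===== SOURCE A (Python) =====
-- def triangular_inferior(matriz):
--     for i in range(len(matriz)-1):
--         for j in range(i+1, len(matriz)):
--             if matriz[i][j] != 0:
--                 return False
--     for i in range(1, len(matriz)):
--         for j in range(i):
--             if matriz[i][j] != 0:
--                 return True
--     return False
-- ===== SOURCE B (Python) =====
-- def triangular_inferior(matriz):
--     # Stage 1: per-row nonzero-index profile (first and last nonzero column
--     # among the columns 0..n-1 that exist); Stage 2: compare profiles to the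
--     # diagonal: lower triangular (non-diagonal) iff every last <= its row
--     # index and some first < its row index.
--     n = len(matriz)
--     prof = []
--     for fila in matriz:
--         nz = [j for j, x in enumerate(fila[:n]) if x != 0]
--         prof.append((min(nz, default=n), max(nz, default=-1)))
--     return all(last <= i for i, (first, last) in enumerate(prof)) \
--         and any(first < i for i, (first, last) in enumerate(prof))
-- ===== Notes on version B (the rewrite author's own statement) =====
-- stated objective: alternative
-- what changed: Instead of scanning the upper and lower triangles, B first builds a per-row profile of the first and last nonzero column index (restricted to columns 0..n-1), then decides by comparing the profile against the diagonal: all last-indices <= row index and some first-index < row index.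
import Mathlib
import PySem

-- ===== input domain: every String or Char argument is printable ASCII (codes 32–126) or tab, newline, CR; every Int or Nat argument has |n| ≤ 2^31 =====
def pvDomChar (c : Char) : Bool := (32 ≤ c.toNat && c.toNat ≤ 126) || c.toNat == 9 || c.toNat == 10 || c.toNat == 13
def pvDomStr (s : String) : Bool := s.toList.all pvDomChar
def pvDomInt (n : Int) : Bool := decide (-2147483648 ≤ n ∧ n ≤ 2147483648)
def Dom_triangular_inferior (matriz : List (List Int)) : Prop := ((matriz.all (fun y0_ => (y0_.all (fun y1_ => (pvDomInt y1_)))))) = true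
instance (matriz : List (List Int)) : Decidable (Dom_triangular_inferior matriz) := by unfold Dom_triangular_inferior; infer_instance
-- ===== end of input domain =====

-- B replaces A's two triangle scans by a staged pipeline: build a per-row profile of the
-- first/last nonzero column index, then compare the profile to the diagonal (objective: alternative).

-- ===== PORT A =====
-- matriz[i][j]; exact wherever Python A evaluates it without IndexError (inside Pre_ every
-- access A performs before returning is in range, so the getD 0 default is never decisive)
def pvCell (matriz : List (List Int)) (i j : Int) : Int :=
  ((PySem.List.pyGet? matriz i).bind (fun row => PySem.List.pyGet? row j)).getD 0

-- 'for … return False' = any over the range; then 'for … return True' = any; else False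
def triangular_inferior (matriz : List (List Int)) : Bool :=
  if (PySem.List.pyRange 0 ((matriz.length : Int) - 1) 1).any (fun i =>
       (PySem.List.pyRange (i + 1) (matriz.length : Int) 1).any (fun j => pvCell matriz i j ≠ 0)) then
    false
  else if (PySem.List.pyRange 1 (matriz.length : Int) 1).any (fun i =>
       (PySem.List.pyRange 0 i 1).any (fun j => pvCell matriz i j ≠ 0)) then
    true
  else
    false

-- ===== PORT B =====
-- per-row profile (min(nz, default=n), max(nz, default=-1)) where nz is the
-- nonzero-index comprehension over fila[:n]
def pvProfRow (n : Int) (fila : List Int) : Int × Int :=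
  let nz := ((PySem.List.enumerate (PySem.List.slice fila none (some n)) 0).filter
      (fun p => p.2 ≠ 0)).map (fun p => p.1)
  ((PySem.List.min? nz (fun j => j)).getD n, (PySem.List.max? nz (fun j => j)).getD (-1))

def triangular_inferior_alt (matriz : List (List Int)) : Bool :=
  let prof := matriz.map (pvProfRow (matriz.length : Int))
  ((PySem.List.enumerate prof 0).all (fun p => decide (p.2.2 ≤ p.1))) &&
  ((PySem.List.enumerate prof 0).any (fun p => decide (p.2.1 < p.1)))

-- ===== PRECONDITION & SPEC =====
-- the in-range upper part of row i is all zero (cols i+1..n-1 that exist)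
def pvRowU (m : List (List Int)) (i : Nat) : Bool :=
  (PySem.List.slice (m.getD i []) (some ((i : Int) + 1)) (some (m.length : Int))).all (fun x => x == 0)
-- the in-range lower part of row i is all zero (cols 0..i-1 that exist)
def pvRowL (m : List (List Int)) (i : Nat) : Bool :=
  (PySem.List.slice (m.getD i []) none (some (i : Int))).all (fun x => x == 0)

-- Pre_ = exactly the inputs on which Python A returns normally: A raises IndexError iff its
-- first pass reaches a row shorter than n before any nonzero upper entry, or the first pass
-- completes cleanly and the second pass reaches a row i shorter than i before any nonzero
-- lower entry; Pre_ negates those two raise conditions.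
def Pre_triangular_inferior (matriz : List (List Int)) : Prop :=
  (¬ ∃ i, i < matriz.length - 1 ∧ pvRowU matriz i = true ∧
      (matriz.getD i []).length < matriz.length ∧
      ∀ k, k < i → (pvRowU matriz k = true ∧ matriz.length ≤ (matriz.getD k []).length)) ∧
  ((∀ i, i < matriz.length - 1 → (pvRowU matriz i = true ∧ matriz.length ≤ (matriz.getD i []).length)) →
    ¬ ∃ i, i < matriz.length ∧ 1 ≤ i ∧ pvRowL matriz i = true ∧
      (matriz.getD i []).length < i ∧
      ∀ k, 1 ≤ k → k < i → (pvRowL matriz k = true ∧ k ≤ (matriz.getD k []).length))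
instance (matriz : List (List Int)) : Decidable (Pre_triangular_inferior matriz) := by unfold Pre_triangular_inferior; infer_instance

def pvWitness_triangular_inferior : List (List Int) := [[1, 0], [2, 3]]

def Spec_triangular_inferior (matriz : List (List Int)) (out : Bool) : Prop := out = triangular_inferior_alt matriz
instance (matriz : List (List Int)) (out : Bool) : Decidable (Spec_triangular_inferior matriz out) := by unfold Spec_triangular_inferior; infer_instance

-- ===== CLAIM (what is proved, stated in full; the proofs are below) =====
def Claim_equal_triangular_inferior : Prop := ∀ (matriz : List (List Int)), Dom_triangular_inferior matriz → Pre_triangular_inferior matriz → Spec_triangular_inferior matriz (triangular_inferior matriz)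

-- ===== LEMMAS AND PROOFS =====

-- canonical forms of "some in-range upper / lower entry is nonzero"
def pvPU (m : List (List Int)) : Prop :=
  ∃ a b : Nat, a < b ∧ b < m.length ∧ (m.getD a []).getD b 0 ≠ 0
def pvPL (m : List (List Int)) : Prop :=
  ∃ a b : Nat, b < a ∧ a < m.length ∧ (m.getD a []).getD b 0 ≠ 0

theorem pvCell_cast (m : List (List Int)) (a b : Nat) :
    pvCell m (a : Int) (b : Int) = (m.getD a []).getD b 0 := by
  simp only [pvCell, PySem.List.pyGet?_natCast, List.getD_eq_getElem?_getD]
  cases h : m[a]? with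
  | none => simp
  | some row => simp

theorem pvA_upper_iff (m : List (List Int)) :
    ((PySem.List.pyRange 0 ((m.length : Int) - 1) 1).any (fun i =>
       (PySem.List.pyRange (i + 1) (m.length : Int) 1).any (fun j => pvCell m i j ≠ 0)) = true)
    ↔ pvPU m := by
  simp only [List.any_eq_true, PySem.List.mem_pyRange_one, decide_eq_true_eq]
  constructor
  · rintro ⟨i, ⟨hi0, hi1⟩, j, ⟨hj0, hj1⟩, hne⟩
    refine ⟨i.toNat, j.toNat, by omega, by omega, ?_⟩
    have hci : ((i.toNat : Nat) : Int) = i := by omega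
    have hcj : ((j.toNat : Nat) : Int) = j := by omega
    rw [← hci, ← hcj, pvCell_cast] at hne
    exact hne
  · rintro ⟨a, b, hab, hb, hne⟩
    exact ⟨(a : Int), ⟨by omega, by omega⟩, (b : Int), ⟨by omega, by omega⟩,
      by rw [pvCell_cast]; exact hne⟩

theorem pvA_lower_iff (m : List (List Int)) :
    ((PySem.List.pyRange 1 (m.length : Int) 1).any (fun i =>
       (PySem.List.pyRange 0 i 1).any (fun j => pvCell m i j ≠ 0)) = true)
    ↔ pvPL m := by
  simp only [List.any_eq_true, PySem.List.mem_pyRange_one, decide_eq_true_eq]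
  constructor
  · rintro ⟨i, ⟨hi0, hi1⟩, j, ⟨hj0, hj1⟩, hne⟩
    refine ⟨i.toNat, j.toNat, by omega, by omega, ?_⟩
    have hci : ((i.toNat : Nat) : Int) = i := by omega
    have hcj : ((j.toNat : Nat) : Int) = j := by omega
    rw [← hci, ← hcj, pvCell_cast] at hne
    exact hne
  · rintro ⟨a, b, hab, ha, hne⟩
    exact ⟨(a : Int), ⟨by omega, by omega⟩, (b : Int), ⟨by omega, by omega⟩,
      by rw [pvCell_cast]; exact hne⟩

-- membership in the row's nonzero-index list
theorem pvMem_nz (n : Nat) (fila : List Int) (j : Int) :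
    (j ∈ ((PySem.List.enumerate (PySem.List.slice fila none (some (n : Int))) 0).filter
        (fun p => p.2 ≠ 0)).map (fun p => p.1))
    ↔ ∃ k : Nat, j = (k : Int) ∧ k < fila.length ∧ k < n ∧ fila.getD k 0 ≠ 0 := by
  rw [PySem.List.slice_to_natCast]
  simp only [List.mem_map, List.mem_filter, PySem.List.mem_enumerate_iff]
  constructor
  · rintro ⟨p, ⟨⟨k, hk, rfl⟩, hnz⟩, rfl⟩
    simp only [List.length_take, lt_min_iff] at hk
    refine ⟨k, by simp, by omega, by omega, ?_⟩
    rw [List.getD_eq_getElem _ _ (by omega : k < fila.length)]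
    have : (fila.take n)[k] = fila[k] := List.getElem_take
    rw [this] at hnz
    simpa using hnz
  · rintro ⟨k, rfl, hkl, hkn, hnz⟩
    have hk : k < (fila.take n).length := by simp; omega
    refine ⟨((0 : Int) + (k : Int), (fila.take n)[k]), ⟨⟨k, hk, rfl⟩, ?_⟩, by simp⟩
    have : (fila.take n)[k] = fila[k] := List.getElem_take
    rw [List.getD_eq_getElem _ _ hkl] at hnz
    simpa [this] using hnz

-- last-nonzero profile vs diagonal
theorem pvProf_last (n : Nat) (fila : List Int) (i : Nat) :
    ((pvProfRow (n : Int) fila).2 ≤ (i : Int))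
    ↔ ∀ k : Nat, k < fila.length → k < n → fila.getD k 0 ≠ 0 → k ≤ i := by
  unfold pvProfRow
  simp only
  set nz := ((PySem.List.enumerate (PySem.List.slice fila none (some (n : Int))) 0).filter
      (fun p => p.2 ≠ 0)).map (fun p => p.1) with hnz
  cases hmx : PySem.List.max? nz (fun j => j) with
  | none =>
    have he : nz = [] := (PySem.List.max?_eq_none_iff _ _).1 hmx
    simp only [Option.getD_none]
    constructor
    · intro _ k hkl hkn hkz
      have : (k : Int) ∈ nz := (pvMem_nz n fila _).2 ⟨k, rfl, hkl, hkn, hkz⟩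
      rw [he] at this; simp at this
    · intro _; omega
  | some mx =>
    simp only [Option.getD_some]
    constructor
    · intro hle k hkl hkn hkz
      have hk : (k : Int) ∈ nz := (pvMem_nz n fila _).2 ⟨k, rfl, hkl, hkn, hkz⟩
      have := PySem.List.max?_isMax hmx _ hk
      simp only at this
      omega
    · intro hall
      have hm := PySem.List.max?_mem hmx
      obtain ⟨k, rfl, hkl, hkn, hkz⟩ := (pvMem_nz n fila _).1 hm
      have := hall k hkl hkn hkz
      omega

-- first-nonzero profile vs diagonal (needs i < n so the empty-row default n cannot be < i)
theorem pvProf_first (n : Nat) (fila : List Int) (i : Nat) (hi : i < n) :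
    ((pvProfRow (n : Int) fila).1 < (i : Int))
    ↔ ∃ k : Nat, k < i ∧ k < fila.length ∧ fila.getD k 0 ≠ 0 := by
  unfold pvProfRow
  simp only
  set nz := ((PySem.List.enumerate (PySem.List.slice fila none (some (n : Int))) 0).filter
      (fun p => p.2 ≠ 0)).map (fun p => p.1) with hnz
  cases hmn : PySem.List.min? nz (fun j => j) with
  | none =>
    have he : nz = [] := (PySem.List.min?_eq_none_iff _ _).1 hmn
    simp only [Option.getD_none]
    constructor
    · intro h; omega
    · rintro ⟨k, hki, hkl, hkz⟩
      have : (k : Int) ∈ nz := (pvMem_nz n fila _).2 ⟨k, rfl, hkl, by omega, hkz⟩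
      rw [he] at this; simp at this
  | some mn =>
    simp only [Option.getD_some]
    constructor
    · intro hlt
      have hm := PySem.List.min?_mem hmn
      obtain ⟨k, rfl, hkl, hkn, hkz⟩ := (pvMem_nz n fila _).1 hm
      exact ⟨k, by omega, hkl, hkz⟩
    · rintro ⟨k, hki, hkl, hkz⟩
      have hk : (k : Int) ∈ nz := (pvMem_nz n fila _).2 ⟨k, rfl, hkl, by omega, hkz⟩
      have := PySem.List.min?_isMin hmn _ hk
      simp only at this
      omega

theorem pvB_all_iff (m : List (List Int)) :
    (((PySem.List.enumerate (m.map (pvProfRow (m.length : Int))) 0).all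
        (fun p => decide (p.2.2 ≤ p.1))) = true) ↔ ¬ pvPU m := by
  simp only [List.all_eq_true, PySem.List.mem_enumerate_iff, decide_eq_true_eq]
  constructor
  · rintro hall ⟨a, b, hab, hb, hne⟩
    have ha : a < m.length := by omega
    have hbl : b < (m.getD a []).length := by
      by_contra hge
      rw [List.getD_eq_default _ _ (by omega)] at hne; exact hne rfl
    have h := hall ((0 : Int) + (a : Int), (m.map (pvProfRow (m.length : Int)))[a]'(by simpa using ha))
      ⟨a, by simpa using ha, rfl⟩
    simp only [List.getElem_map] at h
    have hrow : m[a] = m.getD a [] := (List.getD_eq_getElem m [] ha).symm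
    rw [hrow] at h
    have h2 := (pvProf_last m.length (m.getD a []) a).1 (by simpa using h) b hbl hb hne
    omega
  · intro hnu p hp
    obtain ⟨k, hk, rfl⟩ := hp
    simp only [List.length_map] at hk
    simp only [List.getElem_map]
    have hrow : m[k] = m.getD k [] := (List.getD_eq_getElem m [] hk).symm
    rw [hrow]
    have : ((pvProfRow (m.length : Int) (m.getD k [])).2 ≤ (k : Int)) := by
      rw [pvProf_last]
      intro j hjl hjn hjz
      by_contra hgt
      exact hnu ⟨k, j, by omega, hjn, hjz⟩
    simpa using this

theorem pvB_any_iff (m : List (List Int)) :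
    (((PySem.List.enumerate (m.map (pvProfRow (m.length : Int))) 0).any
        (fun p => decide (p.2.1 < p.1))) = true) ↔ pvPL m := by
  simp only [List.any_eq_true, PySem.List.mem_enumerate_iff, decide_eq_true_eq]
  constructor
  · rintro ⟨p, ⟨k, hk, rfl⟩, hlt⟩
    simp only [List.length_map] at hk
    simp only [List.getElem_map] at hlt
    have hrow : m[k] = m.getD k [] := (List.getD_eq_getElem m [] hk).symm
    rw [hrow] at hlt
    obtain ⟨b, hbk, hbl, hbz⟩ := (pvProf_first m.length (m.getD k []) k hk).1 (by simpa using hlt)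
    exact ⟨k, b, hbk, hk, hbz⟩
  · rintro ⟨a, b, hba, ha, hne⟩
    have hbl : b < (m.getD a []).length := by
      by_contra hge
      rw [List.getD_eq_default _ _ (by omega)] at hne; exact hne rfl
    refine ⟨((0 : Int) + (a : Int), (m.map (pvProfRow (m.length : Int)))[a]'(by simpa using ha)),
      ⟨a, by simpa using ha, rfl⟩, ?_⟩
    simp only [List.getElem_map]
    have hrow : m[a] = m.getD a [] := (List.getD_eq_getElem m [] ha).symm
    rw [hrow]
    have : ((pvProfRow (m.length : Int) (m.getD a [])).1 < (a : Int)) :=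
      (pvProf_first m.length (m.getD a []) a ha).2 ⟨b, hba, hbl, hne⟩
    simpa using this

-- ===== VERDICT (by name: the statement is the Claim_ definition above) =====
theorem triangular_inferior_spec : Claim_equal_triangular_inferior := by
  intro m _ _
  show triangular_inferior m = triangular_inferior_alt m
  have hu := pvB_all_iff m
  have hl := pvB_any_iff m
  have hA1 := pvA_upper_iff m
  have hA2 := pvA_lower_iff m
  unfold triangular_inferior triangular_inferior_alt
  simp only
  cases hb1 : ((PySem.List.enumerate (m.map (pvProfRow (m.length : Int))) 0).all
      (fun p => decide (p.2.2 ≤ p.1))) <;>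
    cases hb2 : ((PySem.List.enumerate (m.map (pvProfRow (m.length : Int))) 0).any
      (fun p => decide (p.2.1 < p.1))) <;> simp_all
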